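-- pv_equiv track=rewrite | github.com/choucavalier/facedetect | script/compute_nb_of_features.py | compute_nb_of_features
-- ===== SOURCE A (Python) =====
-- def compute_nb_of_features(window_w, window_h):
--     nb_of_features = 0
--     min_block_w, max_block_w = 3, 12
--     min_block_h, max_block_h = 3, 12
--     for block_w in range(min_block_w, max_block_w, 3):
--         for block_h in range(min_block_h, max_block_h, 3):
--             for offset_x in range(window_w - block_w + 1):
--                 for offset_y in range(window_h - block_h + 1):
--                     nb_of_features += 1
--     return nb_of_features
-- ===== SOURCE B (Python) =====
-- def compute_nb_of_features(window_w, window_h):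
--     def span(dim):
--         return sum(max(0, dim - block + 1) for block in (3, 6, 9))
--     return span(window_w) * span(window_h)
-- ===== Notes on version B (the rewrite author's own statement) =====
-- stated objective: faster
-- what changed: Replaced the four nested counting loops by a closed-form product: the count factorises as (sum over block widths of max(0,w-bw+1)) * (sum over block heights of max(0,h-bh+1)).
import Mathlib
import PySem

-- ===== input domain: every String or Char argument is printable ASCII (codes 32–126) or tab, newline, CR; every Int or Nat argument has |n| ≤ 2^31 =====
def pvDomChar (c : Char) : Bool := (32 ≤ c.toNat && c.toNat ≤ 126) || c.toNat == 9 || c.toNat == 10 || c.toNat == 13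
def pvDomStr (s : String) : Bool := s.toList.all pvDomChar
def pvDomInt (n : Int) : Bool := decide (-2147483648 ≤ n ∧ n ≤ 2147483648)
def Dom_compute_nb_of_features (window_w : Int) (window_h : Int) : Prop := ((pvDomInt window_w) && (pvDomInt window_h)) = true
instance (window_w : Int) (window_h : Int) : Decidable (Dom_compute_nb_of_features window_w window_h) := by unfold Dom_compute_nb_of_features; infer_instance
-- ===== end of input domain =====

-- B replaces A's four nested counting loops by a closed-form product of two 3-term sums (O(1) vs O(w*h)).

-- ===== PORT A =====
def compute_nb_of_features (window_w : Int) (window_h : Int) : Int :=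
  (PySem.List.pyRange 3 12 3).foldl (fun acc block_w =>
    (PySem.List.pyRange 3 12 3).foldl (fun acc block_h =>
      (PySem.List.pyRange 0 (window_w - block_w + 1) 1).foldl (fun acc _ =>
        (PySem.List.pyRange 0 (window_h - block_h + 1) 1).foldl (fun acc _ =>
          acc + 1) acc) acc) acc) 0

-- ===== PORT B =====
def pvSpan (dim : Int) : Int :=
  max 0 (dim - 3 + 1) + max 0 (dim - 6 + 1) + max 0 (dim - 9 + 1)

def compute_nb_of_features_alt (window_w : Int) (window_h : Int) : Int :=
  pvSpan window_w * pvSpan window_h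

-- ===== PRECONDITION & SPEC =====
def Spec_compute_nb_of_features (window_w : Int) (window_h : Int) (out : Int) : Prop := out = compute_nb_of_features_alt window_w window_h
instance (window_w : Int) (window_h : Int) (out : Int) : Decidable (Spec_compute_nb_of_features window_w window_h out) := by unfold Spec_compute_nb_of_features; infer_instance

-- ===== CLAIM (what is proved, stated in full; the proofs are below) =====
def Claim_equal_compute_nb_of_features : Prop := ∀ (window_w : Int) (window_h : Int), Dom_compute_nb_of_features window_w window_h → Spec_compute_nb_of_features window_w window_h (compute_nb_of_features window_w window_h)

-- ===== LEMMAS AND PROOFS =====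

theorem pv_foldl_add_one {α : Type} (l : List α) (acc : Int) :
    l.foldl (fun a _ => a + 1) acc = acc + l.length := by
  induction l generalizing acc with
  | nil => simp
  | cons x xs ih => simp [List.foldl, ih]; omega

theorem pv_foldl_add_const {α : Type} (c : Int) (l : List α) (acc : Int) :
    l.foldl (fun a _ => a + c) acc = acc + l.length * c := by
  induction l generalizing acc with
  | nil => simp
  | cons x xs ih => simp [List.foldl, ih]; ring

theorem pv_nested (p q acc : Int) :
    (PySem.List.pyRange 0 p 1).foldl (fun a _ =>
      (PySem.List.pyRange 0 q 1).foldl (fun a _ => a + 1) a) acc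
      = acc + max 0 p * max 0 q := by
  have hb : (fun (a : Int) (_ : Int) =>
      (PySem.List.pyRange 0 q 1).foldl (fun a _ => a + 1) a)
      = fun a _ => a + ((PySem.List.pyRange 0 q 1).length : Int) := by
    funext a x
    simpa using pv_foldl_add_one (PySem.List.pyRange 0 q 1) a
  rw [hb, pv_foldl_add_const]
  simp [PySem.List.length_pyRange_one]
  rw [max_comm p, max_comm q]

theorem pv_range39 : PySem.List.pyRange 3 12 3 = [3, 6, 9] := by decide

-- ===== VERDICT (by name: the statement is the Claim_ definition above) =====
theorem compute_nb_of_features_spec : Claim_equal_compute_nb_of_features := by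
  intro w h _
  unfold Spec_compute_nb_of_features compute_nb_of_features compute_nb_of_features_alt pvSpan
  rw [pv_range39]
  simp only [List.foldl, pv_nested]
  ring
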